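-- pv_equiv track=rewrite | github.com/jp-gerona/cryptool | logic/ciphers.py | kamasutra_cipher
-- ===== SOURCE A (Python) =====
-- def kamasutra_cipher(text):
--     monoalpha_normal = list("abcdefghijklmnopqrstuvwxyzABCDEFGHIJKLMNOPQRSTUVWXYZ")
--     monoalpha_shifted = list("nopqrstuvwxyzabcdefghijklmNOPQRSTUVWXYZABCDEFGHIJKLM")
--     monoalpha_split = list(text)
--     monoalpha_output = ""
--
--     for i in monoalpha_split:
--         if i in monoalpha_shifted:
--             monoalpha_index = monoalpha_shifted.index(i)
--             monoalpha_output += monoalpha_normal[monoalpha_index]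
--         else:
--             monoalpha_output += i
--
--     return monoalpha_output
-- ===== SOURCE B (Python) =====
-- def kamasutra_cipher(text):
--     out = []
--     for c in text:
--         o = ord(c)
--         if 97 <= o <= 122:
--             out.append(chr((o - 97 + 13) % 26 + 97))
--         elif 65 <= o <= 90:
--             out.append(chr((o - 65 + 13) % 26 + 65))
--         else:
--             out.append(c)
--     return "".join(out)
-- ===== Notes on version B (the rewrite author's own statement) =====
-- stated objective: faster
-- what changed: Replaced the two 52-character alphabet tables with a closed-form ROT13 computation per character (modular arithmetic on the code point), eliminating the membership test and the linear list.index scan per character.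
import Mathlib
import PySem

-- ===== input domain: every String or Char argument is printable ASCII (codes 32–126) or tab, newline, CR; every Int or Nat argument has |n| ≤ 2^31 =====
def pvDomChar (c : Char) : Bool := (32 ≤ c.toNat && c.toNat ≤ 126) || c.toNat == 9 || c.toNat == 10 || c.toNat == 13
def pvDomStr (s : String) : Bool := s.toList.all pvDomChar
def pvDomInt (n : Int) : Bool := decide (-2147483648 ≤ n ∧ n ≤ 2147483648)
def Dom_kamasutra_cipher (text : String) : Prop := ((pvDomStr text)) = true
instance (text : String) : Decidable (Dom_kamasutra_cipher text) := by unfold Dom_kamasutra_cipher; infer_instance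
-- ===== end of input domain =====

-- B replaces A's membership test + list.index scan over 52-char alphabet tables with a
-- closed-form ROT13 arithmetic per character (alternative algorithm, same output).


-- ===== PORT A =====
-- list("abc…Z") / list("nop…M") as explicit character lists
def pvNormal : List Char :=
  ['a','b','c','d','e','f','g','h','i','j','k','l','m','n','o','p','q','r','s','t','u','v','w','x','y','z',
   'A','B','C','D','E','F','G','H','I','J','K','L','M','N','O','P','Q','R','S','T','U','V','W','X','Y','Z']
def pvShifted : List Char :=
  ['n','o','p','q','r','s','t','u','v','w','x','y','z','a','b','c','d','e','f','g','h','i','j','k','l','m',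
   'N','O','P','Q','R','S','T','U','V','W','X','Y','Z','A','B','C','D','E','F','G','H','I','J','K','L','M']

def kamasutra_cipher (text : String) : String :=
  let monoalpha_split := text.toList
  let monoalpha_output :=
    monoalpha_split.foldl (fun acc i =>
      if pvShifted.contains i then
        acc ++ [pvNormal.getD ((PySem.List.index? pvShifted i).getD 0) i]
      else
        acc ++ [i]) []
  String.ofList monoalpha_output

-- ===== PORT B =====
def rot13Char (c : Char) : Char :=
  let o := c.toNat
  if 97 ≤ o ∧ o ≤ 122 then Char.ofNat ((o - 97 + 13) % 26 + 97)
  else if 65 ≤ o ∧ o ≤ 90 then Char.ofNat ((o - 65 + 13) % 26 + 65)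
  else c

def kamasutra_cipher_alt (text : String) : String :=
  String.ofList (text.toList.map rot13Char)

-- ===== PRECONDITION & SPEC =====
def Spec_kamasutra_cipher (text : String) (out : String) : Prop := out = kamasutra_cipher_alt text
instance (text : String) (out : String) : Decidable (Spec_kamasutra_cipher text out) := by unfold Spec_kamasutra_cipher; infer_instance

-- ===== CLAIM (what is proved, stated in full; the proofs are below) =====
def Claim_equal_kamasutra_cipher : Prop := ∀ (text : String), Dom_kamasutra_cipher text → Spec_kamasutra_cipher text (kamasutra_cipher text)

-- ===== LEMMAS AND PROOFS =====

-- A's per-character substitution (lookup of the shifted table, emit from the normal table)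
-- equals B's ROT13 arithmetic — for every character, letter or not.
theorem pvStep_eq (c : Char) :
    (if pvShifted.contains c then
       pvNormal.getD ((PySem.List.index? pvShifted c).getD 0) c
     else c) = rot13Char c := by
  by_cases hl : 97 ≤ c.toNat ∧ c.toNat ≤ 122
  · obtain ⟨h1, h2⟩ := hl
    interval_cases h : c.toNat <;>
      · have hc : c = Char.ofNat c.toNat := (Char.ofNat_toNat c).symm
        rw [h] at hc; subst hc; decide
  · by_cases hu : 65 ≤ c.toNat ∧ c.toNat ≤ 90
    · obtain ⟨h1, h2⟩ := hu
      interval_cases h : c.toNat <;>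
        · have hc : c = Char.ofNat c.toNat := (Char.ofNat_toNat c).symm
          rw [h] at hc; subst hc; decide
    · have hmem : ¬ c ∈ pvShifted := by
        intro hm
        fin_cases hm <;> first
          | exact absurd (by decide) hl
          | exact absurd (by decide) hu
      rw [rot13Char]
      simp only [List.contains_eq_mem, hmem, decide_false, Bool.false_eq_true, if_false]
      simp only [hl, hu, if_false]

-- the whole loop: A's accumulator fold is the map of the per-character step
theorem pvFold_eq (l : List Char) :
    l.foldl (fun acc i =>
      if pvShifted.contains i then
        acc ++ [pvNormal.getD ((PySem.List.index? pvShifted i).getD 0) i]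
      else
        acc ++ [i]) [] = l.map rot13Char := by
  rw [show (fun (acc : List Char) i =>
        if pvShifted.contains i then
          acc ++ [pvNormal.getD ((PySem.List.index? pvShifted i).getD 0) i]
        else acc ++ [i]) =
      (fun acc i => acc ++ [if pvShifted.contains i then
          pvNormal.getD ((PySem.List.index? pvShifted i).getD 0) i
        else i]) from funext fun acc => funext fun i => by split <;> rfl]
  rw [PySem.List.foldl_append_singleton_eq_map]
  simp only [List.nil_append]
  exact List.map_congr_left fun c _ => pvStep_eq c

-- ===== VERDICT (by name: the statement is the Claim_ definition above) =====
theorem kamasutra_cipher_spec : Claim_equal_kamasutra_cipher := by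
  intro text _
  unfold Spec_kamasutra_cipher kamasutra_cipher kamasutra_cipher_alt
  simp only []
  exact congrArg String.ofList (pvFold_eq text.toList)
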